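-- pv_equiv track=rewrite | github.com/mizamidou/battleship | battleships.py | is_open_sea
-- ===== SOURCE A (Python) =====
-- def _calculate_ship_coordinates(ship):
--     # returns a set of tuple coordinates
--     ship_coords = list()
--     for x in range(ship[3]):
--         if ship[2] == True:
--             ship_coords.append((ship[0], ship[1] + x))
--         else:
--             ship_coords.append((ship[0] + x, ship[1]))
--     return set(ship_coords)
--
-- def is_open_sea(row, column, fleet):
--     # calculate coords for all ships in fleet
--     total_ship_coords = list()
--     for ship in fleet:
--         total_ship_coords.extend(_calculate_ship_coordinates(ship))
--     total_ship_coords = list(total_ship_coords)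
--     # distance of given coord from all ships coords must be >1 for not being adjacent to any ship
--     for point in total_ship_coords:
--         if abs(point[0] - row) > 1 or abs(point[1] - column) > 1:
--             continue
--         else:
--             return False
--     return True
-- ===== SOURCE B (Python) =====
-- _NEIGHBORS = [(-1, -1), (-1, 0), (-1, 1),
--               (0, -1),  (0, 0),  (0, 1),
--               (1, -1),  (1, 0),  (1, 1)]
--
-- def is_open_sea(row, column, fleet):
--     # precompute the forbidden region: every cell within Chebyshev distance 1
--     # of any occupied cell of any ship, then answer with one membership test
--     forbidden = set()
--     for r, c, horizontal, length in fleet: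
--         for x in range(length):
--             if horizontal == True:
--                 cr, cc = r, c + x
--             else:
--                 cr, cc = r + x, c
--             for dr, dc in _NEIGHBORS:
--                 forbidden.add((cr + dr, cc + dc))
--     return (row, column) not in forbidden
-- ===== Notes on version B (the rewrite author's own statement) =====
-- stated objective: alternative
-- what changed: Replaces A's gather-all-ship-cells list and early-return distance scan by precomputing a set of all forbidden cells (Chebyshev distance <= 1 of any ship cell) and answering with a single membership lookup.
import Mathlib
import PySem

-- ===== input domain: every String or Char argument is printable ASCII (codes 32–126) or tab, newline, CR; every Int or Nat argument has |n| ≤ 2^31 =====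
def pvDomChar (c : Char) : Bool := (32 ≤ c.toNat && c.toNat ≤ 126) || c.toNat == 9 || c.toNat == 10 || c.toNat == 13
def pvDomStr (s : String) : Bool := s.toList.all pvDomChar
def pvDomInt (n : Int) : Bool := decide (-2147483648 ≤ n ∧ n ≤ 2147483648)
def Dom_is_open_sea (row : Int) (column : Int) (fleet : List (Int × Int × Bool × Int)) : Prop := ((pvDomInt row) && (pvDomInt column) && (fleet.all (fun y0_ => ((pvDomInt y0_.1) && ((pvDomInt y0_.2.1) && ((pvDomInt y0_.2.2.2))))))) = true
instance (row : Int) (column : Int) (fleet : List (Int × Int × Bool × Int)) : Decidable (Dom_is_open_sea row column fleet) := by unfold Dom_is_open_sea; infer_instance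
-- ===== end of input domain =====

-- B precomputes the set of all cells within Chebyshev distance 1 of any ship cell and
-- answers with a single membership lookup, instead of A's gather-then-scan with early return.
-- A consumes set-iteration order only through an order-independent early-return scan.

-- ===== PORT A =====
-- _calculate_ship_coordinates(ship): build the list of occupied cells, return set(...)
def calculate_ship_coordinates (ship : Int × Int × Bool × Int) : PySem.Set (Int × Int) :=
  PySem.Set.ofList ((PySem.List.pyRange 0 ship.2.2.2 1).map (fun x =>
    if ship.2.2.1 == true then (ship.1, ship.2.1 + x) else (ship.1 + x, ship.2.1)))

-- the early-return scan 'for point in total_ship_coords: …'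
def isOpenScan (row column : Int) : List (Int × Int) → Bool
  | [] => true
  | p :: rest =>
      if 1 < |p.1 - row| ∨ 1 < |p.2 - column| then isOpenScan row column rest else false

def is_open_sea (row : Int) (column : Int) (fleet : List (Int × Int × Bool × Int)) : Bool :=
  let total := fleet.foldl (fun acc ship => acc ++ calculate_ship_coordinates ship) []
  isOpenScan row column total

-- ===== PORT B =====
def pvNeighbors : List (Int × Int) :=
  [(-1, -1), (-1, 0), (-1, 1), (0, -1), (0, 0), (0, 1), (1, -1), (1, 0), (1, 1)]

def addShipForbidden (s : PySem.Set (Int × Int)) (ship : Int × Int × Bool × Int) :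
    PySem.Set (Int × Int) :=
  (PySem.List.pyRange 0 ship.2.2.2 1).foldl (fun s x =>
    let cell := if ship.2.2.1 == true then (ship.1, ship.2.1 + x) else (ship.1 + x, ship.2.1)
    pvNeighbors.foldl (fun s d => PySem.Set.add s (cell.1 + d.1, cell.2 + d.2)) s) s

def is_open_sea_alt (row : Int) (column : Int) (fleet : List (Int × Int × Bool × Int)) : Bool :=
  let forbidden := fleet.foldl addShipForbidden PySem.Set.empty
  !(PySem.Set.contains forbidden (row, column))

-- ===== PRECONDITION & SPEC =====
def Spec_is_open_sea (row : Int) (column : Int) (fleet : List (Int × Int × Bool × Int)) (out : Bool) : Prop := out = is_open_sea_alt row column fleet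
instance (row : Int) (column : Int) (fleet : List (Int × Int × Bool × Int)) (out : Bool) : Decidable (Spec_is_open_sea row column fleet out) := by unfold Spec_is_open_sea; infer_instance

-- ===== CLAIM (what is proved, stated in full; the proofs are below) =====
def Claim_equal_is_open_sea : Prop := ∀ (row : Int) (column : Int) (fleet : List (Int × Int × Bool × Int)), Dom_is_open_sea row column fleet → Spec_is_open_sea row column fleet (is_open_sea row column fleet)

-- ===== LEMMAS AND PROOFS =====

-- a cell of a ship, as A's map produces it
def shipCell (ship : Int × Int × Bool × Int) (x : Int) : Int × Int :=
  if ship.2.2.1 == true then (ship.1, ship.2.1 + x) else (ship.1 + x, ship.2.1)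

theorem isOpenScan_iff (row column : Int) (l : List (Int × Int)) :
    isOpenScan row column l = true ↔ ∀ p ∈ l, 1 < |p.1 - row| ∨ 1 < |p.2 - column| := by
  induction l with
  | nil => simp [isOpenScan]
  | cons p rest ih =>
    by_cases h : 1 < |p.1 - row| ∨ 1 < |p.2 - column| <;> simp [isOpenScan, h, ih]

theorem mem_totalA (p : Int × Int) (fleet : List (Int × Int × Bool × Int)) :
    p ∈ fleet.foldl (fun acc ship => acc ++ calculate_ship_coordinates ship) [] ↔
    ∃ ship ∈ fleet, ∃ x ∈ PySem.List.pyRange 0 ship.2.2.2 1, shipCell ship x = p := by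
  rw [PySem.List.foldl_append_eq_flatMap]
  simp only [List.nil_append, List.mem_flatMap, calculate_ship_coordinates,
    PySem.Set.mem_ofList, List.mem_map, shipCell]

theorem mem_addShipForbidden (q : Int × Int) (s : PySem.Set (Int × Int))
    (ship : Int × Int × Bool × Int) :
    q ∈ addShipForbidden s ship ↔
    q ∈ s ∨ ∃ x ∈ PySem.List.pyRange 0 ship.2.2.2 1, ∃ d ∈ pvNeighbors,
      q = ((shipCell ship x).1 + d.1, (shipCell ship x).2 + d.2) := by
  unfold addShipForbidden
  generalize PySem.List.pyRange 0 ship.2.2.2 1 = r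
  induction r generalizing s with
  | nil => simp
  | cons x xs ih =>
    simp only [List.foldl_cons, ih, PySem.Set.mem_foldl_add, List.mem_cons, shipCell]
    constructor
    · rintro ((h | ⟨d, hd, he⟩) | ⟨x', hx', rest⟩)
      · exact Or.inl h
      · exact Or.inr ⟨x, Or.inl rfl, d, hd, he⟩
      · exact Or.inr ⟨x', Or.inr hx', rest⟩
    · rintro (h | ⟨x', rfl | hx', d, hd, he⟩)
      · exact Or.inl (Or.inl h)
      · exact Or.inl (Or.inr ⟨d, hd, he⟩)
      · exact Or.inr ⟨x', hx', d, hd, he⟩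

theorem mem_forbidden (q : Int × Int) (s : PySem.Set (Int × Int))
    (fleet : List (Int × Int × Bool × Int)) :
    q ∈ fleet.foldl addShipForbidden s ↔
    q ∈ s ∨ ∃ ship ∈ fleet, ∃ x ∈ PySem.List.pyRange 0 ship.2.2.2 1, ∃ d ∈ pvNeighbors,
      q = ((shipCell ship x).1 + d.1, (shipCell ship x).2 + d.2) := by
  induction fleet generalizing s with
  | nil => simp
  | cons ship rest ih =>
    simp only [List.foldl_cons, ih, mem_addShipForbidden, List.mem_cons]
    constructor
    · rintro (⟨h | h⟩ | h)
      · exact Or.inl h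
      · exact Or.inr ⟨ship, Or.inl rfl, h⟩
      · obtain ⟨sh, hsh, hx⟩ := h
        exact Or.inr ⟨sh, Or.inr hsh, hx⟩
    · rintro (h | ⟨sh, (rfl | hsh), hx⟩)
      · exact Or.inl (Or.inl h)
      · exact Or.inl (Or.inr hx)
      · exact Or.inr ⟨sh, hsh, hx⟩

theorem close_iff (cr cc row column : Int) :
    (∃ d ∈ pvNeighbors, (row, column) = (cr + d.1, cc + d.2)) ↔
    |cr - row| ≤ 1 ∧ |cc - column| ≤ 1 := by
  simp [pvNeighbors, Prod.mk.injEq, abs_le]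
  omega

-- ===== VERDICT (by name: the statement is the Claim_ definition above) =====
theorem is_open_sea_spec : Claim_equal_is_open_sea := by
  intro row column fleet _
  unfold Spec_is_open_sea is_open_sea is_open_sea_alt
  rw [Bool.eq_iff_iff, isOpenScan_iff, Bool.not_eq_eq_eq_not, Bool.not_true,
      ← Bool.not_eq_true, PySem.Set.contains_iff, mem_forbidden]
  constructor
  · rintro hall (h | ⟨sh, hsh, x, hx, hd⟩)
    · simp [PySem.Set.empty] at h
    · rw [close_iff] at hd
      rcases hall (shipCell sh x) ((mem_totalA _ _).2 ⟨sh, hsh, x, hx, rfl⟩) with h | h <;> omega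
  · intro hnot p hp
    rw [mem_totalA] at hp
    obtain ⟨sh, hsh, x, hx, rfl⟩ := hp
    by_contra hc
    push Not at hc
    exact hnot (Or.inr ⟨sh, hsh, x, hx, (close_iff _ _ _ _).2 ⟨by omega, by omega⟩⟩)
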